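-- pv_equiv track=rewrite | github.com/NYPL/ami-preservation | ami_scripts/markdown_linter.py | check_table_alignment
-- ===== SOURCE A (Python) =====
-- def check_table_alignment(lines):
--     issues = []
--     table_start = False
--     header_cols = 0
--     for i, line in enumerate(lines):
--         if "|" in line:
--             cols = [col.strip() for col in line.split("|") if col.strip()]
--             if "---" in line and not table_start:
--                 header_cols = len(cols)
--                 table_start = True
--             elif table_start:
--                 if len(cols) != header_cols:
--                     issues.append((i + 1, f"Table row column mismatch: expected {header_cols}, got {len(cols)}"))
--         else:
--             table_start = False
--     return issues
-- ===== SOURCE B (Python) =====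
-- def _ncols(line):
--     return len([col for col in line.split("|") if col.strip()])
--
--
-- def check_table_alignment(lines):
--     issues = []
--     n = len(lines)
--     i = 0
--     while i < n:
--         if "|" not in lines[i]:
--             i += 1
--             continue
--         # maximal run of consecutive lines containing "|"
--         j = i
--         while j < n and "|" in lines[j]:
--             j += 1
--         # first separator line of the run sets the header width
--         k = i
--         while k < j and "---" not in lines[k]:
--             k += 1
--         if k < j:
--             header = _ncols(lines[k])
--             for m in range(k + 1, j):
--                 c = _ncols(lines[m])
--                 if c != header:
--                     issues.append((m + 1, f"Table row column mismatch: expected {header}, got {c}"))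
--         i = j
--     return issues
-- ===== Notes on version B (the rewrite author's own statement) =====
-- stated objective: alternative
-- what changed: Replaces A's single pass with a table_start flag and persistent header state by an explicit two-level decomposition: split the lines into maximal runs of '|'-containing lines, locate the first '---' line of each run, and check only the lines after it.
import Mathlib
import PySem

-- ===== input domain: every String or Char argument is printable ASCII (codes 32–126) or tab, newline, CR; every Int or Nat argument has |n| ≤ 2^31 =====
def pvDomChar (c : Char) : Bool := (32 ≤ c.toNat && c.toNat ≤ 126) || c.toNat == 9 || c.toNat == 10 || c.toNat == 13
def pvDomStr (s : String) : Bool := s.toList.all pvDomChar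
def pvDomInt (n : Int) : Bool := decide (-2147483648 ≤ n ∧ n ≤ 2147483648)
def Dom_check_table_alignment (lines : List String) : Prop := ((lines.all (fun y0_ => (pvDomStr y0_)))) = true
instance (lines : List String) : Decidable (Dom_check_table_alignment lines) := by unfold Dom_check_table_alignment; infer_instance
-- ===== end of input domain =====

-- B replaces A's flag-carrying single pass by an explicit decomposition into maximal runs of '|' lines; same cost, proved equal on all inputs.


-- ===== PORT A =====
-- shared with B: these mirror "|" in line, "---" in line, and
-- len([col.strip() for col in line.split("|") if col.strip()]) (both Pythons compute them verbatim)
def pvHasBar (line : String) : Bool := PySem.Str.isIn "|" line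
def pvHasSep (line : String) : Bool := PySem.Str.isIn "---" line
def pvNcols (line : String) : Int :=
  (((PySem.Str.split? line "|").getD []).filter (fun c => PySem.Str.strip c ≠ "")).length
def pvMsg (expected got : Int) : String :=
  "Table row column mismatch: expected " ++ PySem.Int.toStr expected ++ ", got " ++ PySem.Int.toStr got

-- A's for-loop over enumerate(lines) with state (issues, table_start, header_cols)
def aLoop (issues : List (Int × String)) (i : Int) (tableStart : Bool) (headerCols : Int) :
    List String → List (Int × String)
  | [] => issues
  | line :: rest =>
    if pvHasBar line then
      let cols := pvNcols line
      if pvHasSep line && !tableStart then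
        aLoop issues (i + 1) true cols rest
      else if tableStart then
        if cols ≠ headerCols then
          aLoop (issues ++ [(i + 1, pvMsg headerCols cols)]) (i + 1) tableStart headerCols rest
        else aLoop issues (i + 1) tableStart headerCols rest
      else aLoop issues (i + 1) tableStart headerCols rest
    else aLoop issues (i + 1) false headerCols rest

def check_table_alignment (lines : List String) : List (Int × String) :=
  aLoop [] 0 false 0 lines

-- ===== PORT B =====
-- B's inner for-loop: check every remaining line of the run against the header width
def bRows (header : Int) (i : Int) : List String → List (Int × String)
  | [] => []
  | line :: rest =>
    let c := pvNcols line
    (if c ≠ header then [(i + 1, pvMsg header c)] else []) ++ bRows header (i + 1) rest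

-- B's k-scan: find the first '---' line of the run, then check the rest
def bGroup (i : Int) : List String → List (Int × String)
  | [] => []
  | line :: rest =>
    if pvHasSep line then bRows (pvNcols line) (i + 1) rest else bGroup (i + 1) rest

-- B's outer while-loop: skip non-'|' lines, carve off a maximal run, process it
def bMain (i : Int) : List String → List (Int × String)
  | [] => []
  | line :: rest =>
    if pvHasBar line then
      bGroup i (line :: rest.takeWhile pvHasBar) ++
        bMain (i + 1 + (rest.takeWhile pvHasBar).length) (rest.dropWhile pvHasBar)
    else bMain (i + 1) rest
  termination_by ls => ls.length
  decreasing_by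
    · simpa using Nat.lt_succ_of_le (List.length_dropWhile_le pvHasBar rest)
    · simp

def check_table_alignment_alt (lines : List String) : List (Int × String) :=
  bMain 0 lines

-- ===== PRECONDITION & SPEC =====
def Spec_check_table_alignment (lines : List String) (out : List (Int × String)) : Prop := out = check_table_alignment_alt lines
instance (lines : List String) (out : List (Int × String)) : Decidable (Spec_check_table_alignment lines out) := by unfold Spec_check_table_alignment; infer_instance

-- ===== CLAIM (what is proved, stated in full; the proofs are below) =====
def Claim_equal_check_table_alignment : Prop := ∀ (lines : List String), Dom_check_table_alignment lines → Spec_check_table_alignment lines (check_table_alignment lines)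

-- ===== LEMMAS AND PROOFS =====

-- A's accumulator is a prefix that can be factored out
theorem aLoop_acc (ls : List String) : ∀ (acc : List (Int × String)) (i : Int) (ts : Bool) (hc : Int),
    aLoop acc i ts hc ls = acc ++ aLoop [] i ts hc ls := by
  induction ls with
  | nil => intro acc i ts hc; simp [aLoop]
  | cons l rest ih =>
    intro acc i ts hc
    simp only [aLoop]
    split_ifs with h1 h2 h3 h4
    · exact ih acc (i + 1) true (pvNcols l)
    · rw [ih (acc ++ [(i + 1, pvMsg hc (pvNcols l))]), ih ([] ++ [(i + 1, pvMsg hc (pvNcols l))])]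
      simp
    · exact ih acc (i + 1) ts hc
    · exact ih acc (i + 1) ts hc
    · exact ih acc (i + 1) false hc

-- re-attaching a partially searched run to bMain
theorem bGroup_glue (ls : List String) : ∀ (i : Int),
    bGroup i (ls.takeWhile pvHasBar) ++
      bMain (i + (ls.takeWhile pvHasBar).length) (ls.dropWhile pvHasBar) = bMain i ls := by
  induction ls with
  | nil => intro i; simp [bGroup, bMain]
  | cons l rest _ =>
    intro i
    by_cases hb : pvHasBar l
    · simp only [List.takeWhile_cons, List.dropWhile_cons, hb, if_pos, bMain, bGroup]
      have harith : i + ((l :: rest.takeWhile pvHasBar).length : Nat) =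
          i + 1 + ((rest.takeWhile pvHasBar).length : Nat) := by push_cast [List.length_cons]; ring
      split_ifs with hs <;> rw [harith]
    · simp [hb, bGroup, bMain]

-- the joint invariant: A from the searching state equals bMain; A from the in-table state
-- equals bRows on the rest of the current run followed by bMain on what comes after it
theorem key : ∀ (n : Nat) (ls : List String), ls.length ≤ n →
    (∀ (i : Int) (hc : Int), aLoop [] i false hc ls = bMain i ls) ∧
    (∀ (i : Int) (hc : Int), aLoop [] i true hc ls =
      bRows hc i (ls.takeWhile pvHasBar) ++
        bMain (i + (ls.takeWhile pvHasBar).length) (ls.dropWhile pvHasBar)) := by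
  intro n
  induction n with
  | zero =>
    intro ls hls
    have : ls = [] := List.length_eq_zero_iff.mp (Nat.le_zero.mp hls)
    subst this
    constructor <;> intro i hc <;> simp [aLoop, bMain, bRows]
  | succ n ih =>
    intro ls hls
    match ls with
    | [] => constructor <;> intro i hc <;> simp [aLoop, bMain, bRows]
    | l :: rest =>
      have hr : rest.length ≤ n := by simpa using Nat.lt_succ_iff.mp (Nat.lt_of_lt_of_le (by simp) hls)
      have harith : ∀ i : Int, i + ((l :: rest.takeWhile pvHasBar).length : Nat) =
          i + 1 + ((rest.takeWhile pvHasBar).length : Nat) := by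
        intro i; push_cast [List.length_cons]; ring
      constructor
      · intro i hc
        by_cases hb : pvHasBar l
        · by_cases hs : pvHasSep l
          · -- separator found: A enters the table state, B's bGroup hands over to bRows
            have hT := (ih rest hr).2 (i + 1) (pvNcols l)
            simp only [aLoop, hb, hs, if_pos, Bool.not_false, Bool.and_true, bMain, bGroup, hT]
          · -- no separator yet: both keep searching
            have hM := (ih rest hr).1 (i + 1) hc
            rw [show aLoop [] i false hc (l :: rest) = aLoop [] (i + 1) false hc rest from by
                  simp [aLoop, hb, hs],
                hM, ← bGroup_glue rest (i + 1)]
            simp only [bMain, hb, if_pos, bGroup, hs, if_neg, Bool.false_eq_true, not_false_iff]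
        · -- line without '|': both move on in the searching state
          have hM := (ih rest hr).1 (i + 1) hc
          simp [aLoop, hb, bMain, hM]
      · intro i hc
        by_cases hb : pvHasBar l
        · -- still inside the run: A row-checks (even a later '---' line), so does bRows
          have hT := (ih rest hr).2 (i + 1) hc
          have hne : ¬ (pvHasSep l && !true) = true := by simp
          simp only [aLoop, hb, if_pos, if_neg hne, List.takeWhile_cons, List.dropWhile_cons, bRows]
          by_cases hceq : pvNcols l ≠ hc
          · rw [if_pos hceq, if_pos hceq, aLoop_acc, hT, harith i]
            simp
          · rw [if_neg hceq, if_neg hceq, hT, harith i]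
            simp
        · -- run over: A falls back to the searching state, B's run is empty here
          have hM := (ih rest hr).1 (i + 1) hc
          simp [aLoop, hb, bRows, bMain, hM]

-- ===== VERDICT (by name: the statement is the Claim_ definition above) =====
theorem check_table_alignment_spec : Claim_equal_check_table_alignment := by
  intro lines _
  unfold Spec_check_table_alignment check_table_alignment check_table_alignment_alt
  exact (key lines.length lines le_rfl).1 0 0
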